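-- pv_equiv track=rewrite | github.com/Ivanio1/PROG_SEM1 | EGE/5 240.py | perevod
-- ===== SOURCE A (Python) =====
-- def perevod(x):
--     y=str(x)
--     s=''
--     s1=''
--     for i in range(len(y)):
--         t=bin(int(y[i]))[2:]
--         while len(t)<4:
--             t='0'+t
--         s=s+t
--     for i in range(len(s)):
--         if s[i]=='0':
--             s1=s1+'1'
--         else:
--             s1=s1+'0'
--     return int(s1,2)
-- ===== SOURCE B (Python) =====
-- def perevod(x):
--     r = 0
--     for c in str(x):
--         r = r * 16 + (15 - int(c))
--     return r
-- ===== Notes on version B (the rewrite author's own statement) =====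
-- stated objective: simpler
-- what changed: Replaces the build-binary-string/invert/reparse pipeline with one arithmetic pass: each decimal digit d contributes 15-d in base 16 (inverting a 4-bit group is 15-d, and concatenating 4-bit groups is base-16 positional value).
import Mathlib
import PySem

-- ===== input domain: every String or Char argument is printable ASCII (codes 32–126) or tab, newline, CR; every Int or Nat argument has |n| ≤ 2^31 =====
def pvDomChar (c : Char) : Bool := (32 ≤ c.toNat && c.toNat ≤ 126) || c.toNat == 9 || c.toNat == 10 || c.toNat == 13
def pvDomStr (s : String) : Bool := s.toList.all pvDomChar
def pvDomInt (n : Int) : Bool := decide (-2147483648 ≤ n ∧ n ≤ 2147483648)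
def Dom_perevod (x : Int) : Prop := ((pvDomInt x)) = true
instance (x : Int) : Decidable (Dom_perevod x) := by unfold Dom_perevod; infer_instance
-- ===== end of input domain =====

-- B replaces A's build-binary-string / invert / reparse pipeline with one arithmetic pass
-- (each decimal digit d contributes 15 - d in base 16): simpler, same exact values.

-- ===== PORT A =====
-- int(y[i]) on the one-character string y[i] (shared helper: both Pythons call int on one character)
def pvDigit (c : Char) : Int := (PySem.Int.ofChars? [c]).getD 0

-- the 'while len(t)<4: t='0'+t' loop; it adds one character per iteration and stops at
-- length 4, so fuel 4 makes the same computation total (structural recursion, exact)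
def pvPad : Nat → List Char → List Char
  | 0, t => t
  | k+1, t => if t.length < 4 then pvPad k ('0' :: t) else t

-- int(s1, 2), ported by hand: s1 as built by A's second loop consists only of '0'/'1'
-- characters (and is nonempty when x ≥ 0), and on such strings Python's int(·, 2) is
-- exactly this left fold — exact on Pre_perevod
def pvParseBin (cs : List Char) : Int :=
  cs.foldl (fun a c => 2 * a + (if c = '1' then 1 else 0)) 0

def perevod (x : Int) : Int :=
  let y : List Char := PySem.Int.toChars x                -- y = str(x)
  let s : List Char :=                                    -- for i in range(len(y)): t = bin(int(y[i]))[2:]; pad to 4; s = s + t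
    (PySem.List.pyRange 0 (PySem.List.len y) 1).foldl
      (fun s i =>
        let t := pvPad 4 (PySem.List.slice (PySem.Int.toBinChars0b (pvDigit (PySem.List.pyGetD y i ' '))) (some 2) none)
        s ++ t) []
  let s1 : List Char :=                                   -- for i in range(len(s)): invert each bit character
    (PySem.List.pyRange 0 (PySem.List.len s) 1).foldl
      (fun s1 i => if PySem.List.pyGetD s i ' ' = '0' then s1 ++ ['1'] else s1 ++ ['0']) []
  pvParseBin s1                                           -- return int(s1, 2)

-- ===== PORT B =====
def perevod_alt (x : Int) : Int :=
  (PySem.Int.toChars x).foldl (fun r c => r * 16 + (15 - pvDigit c)) 0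

-- ===== PRECONDITION & SPEC =====
-- Pre_ excludes x < 0 only: there str(x) starts with '-' and int('-') raises ValueError in A (and in B).
def Pre_perevod (x : Int) : Prop := 0 ≤ x
instance (x : Int) : Decidable (Pre_perevod x) := by unfold Pre_perevod; infer_instance
def pvWitness_perevod : Int := 240

def Spec_perevod (x : Int) (out : Int) : Prop := out = perevod_alt x
instance (x : Int) (out : Int) : Decidable (Spec_perevod x out) := by unfold Spec_perevod; infer_instance

-- ===== CLAIM (what is proved, stated in full; the proofs are below) =====
def Claim_equal_perevod : Prop := ∀ (x : Int), Dom_perevod x → Pre_perevod x → Spec_perevod x (perevod x)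

-- ===== LEMMAS AND PROOFS =====

-- the per-digit chunk of A's first loop: bin(int(c))[2:] zero-padded to 4 characters
def pvChunk (c : Char) : List Char :=
  pvPad 4 (PySem.List.slice (PySem.Int.toBinChars0b (pvDigit c)) (some 2) none)

-- the bit inversion of A's second loop
def pvInv (c : Char) : Char := if c = '0' then '1' else '0'

-- A with its index loops turned into structural folds: parse the inverted concatenation of the chunks
lemma perevod_eq (x : Int) :
    perevod x = pvParseBin (((PySem.Int.toChars x).flatMap pvChunk).map pvInv) := by
  show List.foldl (fun a c => 2 * a + (if c = '1' then 1 else 0)) 0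
      (List.foldl (fun s1 i => if PySem.List.pyGetD (List.foldl
          (fun s i => s ++ pvPad 4 (PySem.List.slice (PySem.Int.toBinChars0b (pvDigit (PySem.List.pyGetD (PySem.Int.toChars x) i ' '))) (some 2) none)) [] (PySem.List.pyRange 0 (PySem.List.len (PySem.Int.toChars x)) 1)) i ' ' = '0' then s1 ++ ['1'] else s1 ++ ['0']) []
        (PySem.List.pyRange 0 (PySem.List.len (List.foldl
          (fun s i => s ++ pvPad 4 (PySem.List.slice (PySem.Int.toBinChars0b (pvDigit (PySem.List.pyGetD (PySem.Int.toChars x) i ' '))) (some 2) none)) [] (PySem.List.pyRange 0 (PySem.List.len (PySem.Int.toChars x)) 1))) 1)) = _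
  rw [show (PySem.List.pyRange 0 (PySem.List.len (PySem.Int.toChars x)) 1).foldl
      (fun s i =>
        let t := pvPad 4 (PySem.List.slice (PySem.Int.toBinChars0b (pvDigit (PySem.List.pyGetD (PySem.Int.toChars x) i ' '))) (some 2) none)
        s ++ t) []
      = (PySem.Int.toChars x).foldl (fun s c => s ++ pvChunk c) [] from
    PySem.List.foldl_pyRange_zero_pyGetD (PySem.Int.toChars x) ' ' (fun s c => s ++ pvChunk c) []]
  rw [PySem.List.foldl_append_eq_flatMap, List.nil_append]
  rw [show (PySem.List.pyRange 0 (PySem.List.len ((PySem.Int.toChars x).flatMap pvChunk)) 1).foldl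
      (fun s1 i => if PySem.List.pyGetD ((PySem.Int.toChars x).flatMap pvChunk) i ' ' = '0' then s1 ++ ['1'] else s1 ++ ['0']) []
      = ((PySem.Int.toChars x).flatMap pvChunk).foldl (fun s1 c => s1 ++ [pvInv c]) [] from by
    rw [show (fun (s1 : List Char) (c : Char) => s1 ++ [pvInv c]) = fun s1 c => if c = '0' then s1 ++ ['1'] else s1 ++ ['0'] from by
      funext s1 c; by_cases h : c = '0' <;> simp [h, pvInv]]
    exact PySem.List.foldl_pyRange_zero_pyGetD _ ' ' (fun s1 c => if c = '0' then s1 ++ ['1'] else s1 ++ ['0']) []]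
  rw [PySem.List.foldl_append_singleton_eq_map, List.nil_append]
  rfl

-- generalizing the accumulator of the binary-parsing fold
lemma foldl_shift (cs : List Char) : ∀ init : Int,
    cs.foldl (fun a c => 2 * a + (if c = '1' then 1 else 0)) init
      = init * 2 ^ cs.length + cs.foldl (fun a c => 2 * a + (if c = '1' then 1 else 0)) 0 := by
  induction cs with
  | nil => intro init; simp
  | cons c cs ih =>
    intro init
    simp only [List.foldl_cons, List.length_cons]
    rw [ih (2 * init + _), ih (2 * 0 + _)]
    ring

-- one decimal digit: folding its inverted 4-bit chunk into the accumulator contributes 15 - r in base 16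
lemma digit_step (r : Nat) (hr : r < 10) (init : Int) :
    ((pvChunk (Nat.digitChar r)).map pvInv).foldl (fun a c => 2 * a + (if c = '1' then 1 else 0)) init
      = init * 16 + (15 - (r : Int)) := by
  rw [foldl_shift]
  have hlen : ((pvChunk (Nat.digitChar r)).map pvInv).length = 4 := by
    interval_cases r <;> decide
  have hval : ((pvChunk (Nat.digitChar r)).map pvInv).foldl
      (fun a c => 2 * a + (if c = '1' then 1 else 0)) 0 = 15 - (r : Int) := by
    interval_cases r <;> decide
  rw [hlen, hval]; ring

lemma pvDigit_digitChar (r : Nat) (hr : r < 10) : pvDigit (Nat.digitChar r) = (r : Int) := by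
  interval_cases r <;> decide

-- Nat.toDigits: accumulator and fuel independence, then the decimal recurrence
lemma toDigitsCore_acc (b : Nat) : ∀ (f n : Nat) (acc : List Char),
    Nat.toDigitsCore b f n acc = Nat.toDigitsCore b f n [] ++ acc := by
  intro f
  induction f with
  | zero => intro n acc; simp [Nat.toDigitsCore]
  | succ f ih =>
    intro n acc
    simp only [Nat.toDigitsCore]
    by_cases h : n / b = 0
    · simp [h]
    · simp only [h, if_false]
      rw [ih (n / b) (Nat.digitChar (n % b) :: acc), ih (n / b) [Nat.digitChar (n % b)]]
      simp

lemma toDigitsCore_fuel (b : Nat) (hb : 2 ≤ b) : ∀ (f f' n : Nat), n < f → n < f' →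
    Nat.toDigitsCore b f n [] = Nat.toDigitsCore b f' n [] := by
  intro f
  induction f with
  | zero => intro f' n h; omega
  | succ f ih =>
    intro f' n hf hf'
    cases f' with
    | zero => omega
    | succ f' =>
      simp only [Nat.toDigitsCore]
      by_cases h : n / b = 0
      · simp [h]
      · simp only [h, if_false]
        rw [toDigitsCore_acc, toDigitsCore_acc b f' (n / b)]
        have hn : 0 < n := by
          rcases Nat.eq_zero_or_pos n with h0 | h0
          · exact absurd (by simp [h0] : n / b = 0) h
          · exact h0
        have hlt : n / b < n := Nat.div_lt_self hn hb
        rw [ih f' (n / b) (by omega) (by omega)]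

lemma toDigits_rec (m : Nat) (hm : 10 ≤ m) :
    Nat.toDigits 10 m = Nat.toDigits 10 (m / 10) ++ [Nat.digitChar (m % 10)] := by
  show Nat.toDigitsCore 10 (m + 1) m [] = _
  have h : ¬ (m / 10 = 0) := by omega
  simp only [Nat.toDigitsCore, h, if_false]
  rw [toDigitsCore_acc]
  unfold Nat.toDigits
  rw [toDigitsCore_fuel 10 (by omega) m (m / 10 + 1) (m / 10) (by omega) (by omega)]

lemma toDigits_small (m : Nat) (hm : m < 10) :
    Nat.toDigits 10 m = [Nat.digitChar m] := by
  show Nat.toDigitsCore 10 (m + 1) m [] = _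
  have h : m / 10 = 0 := by omega
  have h2 : m % 10 = m := by omega
  simp [Nat.toDigitsCore, h, h2]

-- the main induction over the decimal digits of m: A's parse of the inverted chunk
-- concatenation equals B's base-16 fold
lemma main_fold (m : Nat) : ∀ (init : Int),
    (((Nat.toDigits 10 m).flatMap pvChunk).map pvInv).foldl
        (fun a c => 2 * a + (if c = '1' then 1 else 0)) init
      = (Nat.toDigits 10 m).foldl (fun r c => r * 16 + (15 - pvDigit c)) init := by
  induction m using Nat.strong_induction_on with
  | _ m ih =>
    intro init
    by_cases hm : m < 10
    · rw [toDigits_small m hm]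
      simp only [List.flatMap_cons, List.flatMap_nil, List.append_nil, List.foldl_cons, List.foldl_nil]
      rw [digit_step m hm init, pvDigit_digitChar m hm]
    · rw [toDigits_rec m (by omega)]
      have hlt : m / 10 < m := Nat.div_lt_self (by omega) (by omega)
      simp only [List.flatMap_append, List.map_append, List.foldl_append]
      rw [ih (m / 10) hlt init]
      simp only [List.flatMap_cons, List.flatMap_nil, List.append_nil, List.foldl_cons, List.foldl_nil]
      rw [digit_step (m % 10) (by omega), pvDigit_digitChar (m % 10) (by omega)]

-- ===== VERDICT (by name: the statement is the Claim_ definition above) =====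
theorem perevod_spec : Claim_equal_perevod := by
  intro x _ hpre
  unfold Pre_perevod at hpre
  unfold Spec_perevod perevod_alt
  rw [perevod_eq]
  have hx : PySem.Int.toChars x = Nat.toDigits 10 x.toNat := by
    unfold PySem.Int.toChars
    rw [if_neg (by omega)]
  rw [hx]
  exact main_fold x.toNat 0
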